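-- pv_equiv track=rewrite | github.com/rockhard07/Attendance_roster | nda_calculator.py | calculate_nda
-- ===== SOURCE A (Python) =====
-- def to_minutes(time_str):
--     """Convert HH:MM string to minutes from start of day."""
--     if not time_str:
--         return -1
--     try:
--         h, m = map(int, time_str.split(':'))
--         return h * 60 + m
--     except (ValueError, AttributeError):
--         return -1
--
-- def calculate_nda(sign_on_str, sign_off_str):
--     """
--     Calculate NDA category and amount based on business rules.
--     Rules:
--     N4 (175): Sign Off [01:00-06:00] OR Sign On [01:00-02:00]
--     N3 (140): Sign Off [00:01-00:59] OR Sign On [02:01-03:00]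
--     N2 (120): Sign Off [23:01-23:59] OR Sign On [03:01-04:00]
--     N1 (90):  Sign Off [22:00-22:59] OR Sign On [04:01-05:00]
--     """
--     on_m = to_minutes(sign_on_str)
--     off_m = to_minutes(sign_off_str)
--
--     if on_m == -1 or off_m == -1:
--         return None, 0
--
--     # Handle "Midnight Wrap"
--     # If Sign-Off is 00:00 and Sign-On was late in the evening (e.g., after 12:00)
--     # treat Sign-Off as 24:00 (1440 minutes).
--     if off_m == 0 and on_m > 720:  # 12:00 = 720 mins
--         off_m = 1440
--
--     # Define Categories
--     categories = [
--         {'name': 'N4', 'value': 175,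
--          'off_range': (60, 360), 'on_range': (60, 120)},   # 01:00-06:00, 01:00-02:00
--         {'name': 'N3', 'value': 140,
--          'off_range': (0, 59), 'on_range': (121, 180)},    # 00:00-00:59, 02:01-03:00
--         {'name': 'N2', 'value': 120,
--          'off_range': (1380, 1439), 'on_range': (181, 240)}, # 23:00-23:59, 03:01-04:00
--         {'name': 'N1', 'value': 90,
--          'off_range': (1320, 1379), 'on_range': (241, 300)}  # 22:00-22:59, 04:01-05:00
--     ]
--
--     best_cat = None
--     max_val = 0
--
--     for cat in categories:
--         # Check Sign Off
--         off_match = cat['off_range'][0] <= off_m <= cat['off_range'][1]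
--
--         # Explicit check for 1440 (00:00 after midnight wrap) in N3
--         if cat['name'] == 'N3' and off_m == 1440:
--             off_match = True
--
--         # Check Sign On
--         on_match = cat['on_range'][0] <= on_m <= cat['on_range'][1]
--
--         if off_match or on_match:
--             if cat['value'] > max_val:
--                 max_val = cat['value']
--                 best_cat = cat['name']
--
--     return best_cat, max_val
-- ===== SOURCE B (Python) =====
-- def to_minutes(time_str):
--     """Convert HH:MM string to minutes from start of day."""
--     if not time_str:
--         return -1
--     try:
--         h, m = map(int, time_str.split(':'))
--         return h * 60 + m
--     except (ValueError, AttributeError):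
--         return -1
--
--
-- def _classify_off(off_m):
--     """NDA value earned by the sign-off time alone."""
--     if 60 <= off_m <= 360:
--         return 175
--     if 0 <= off_m <= 59 or off_m == 1440:
--         return 140
--     if 1380 <= off_m <= 1439:
--         return 120
--     if 1320 <= off_m <= 1379:
--         return 90
--     return 0
--
--
-- def _classify_on(on_m):
--     """NDA value earned by the sign-on time alone."""
--     if 60 <= on_m <= 120:
--         return 175
--     if 121 <= on_m <= 180:
--         return 140
--     if 181 <= on_m <= 240:
--         return 120
--     if 241 <= on_m <= 300:
--         return 90
--     return 0
--
--
-- _NAME_OF_VALUE = {175: 'N4', 140: 'N3', 120: 'N2', 90: 'N1'}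
--
--
-- def calculate_nda(sign_on_str, sign_off_str):
--     on_m = to_minutes(sign_on_str)
--     off_m = to_minutes(sign_off_str)
--     if on_m == -1 or off_m == -1:
--         return None, 0
--     if off_m == 0 and on_m > 720:
--         off_m = 1440
--     best = max(_classify_off(off_m), _classify_on(on_m))
--     if best == 0:
--         return None, 0
--     return _NAME_OF_VALUE[best], best
-- ===== Notes on version B (the rewrite author's own statement) =====
-- stated objective: simpler
-- what changed: Replaced the scan over a list of category-record dicts (tracking best_cat/max_val) by two independent per-field classifiers classify_off/classify_on combined with max and a value-to-name table.
import Mathlib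
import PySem

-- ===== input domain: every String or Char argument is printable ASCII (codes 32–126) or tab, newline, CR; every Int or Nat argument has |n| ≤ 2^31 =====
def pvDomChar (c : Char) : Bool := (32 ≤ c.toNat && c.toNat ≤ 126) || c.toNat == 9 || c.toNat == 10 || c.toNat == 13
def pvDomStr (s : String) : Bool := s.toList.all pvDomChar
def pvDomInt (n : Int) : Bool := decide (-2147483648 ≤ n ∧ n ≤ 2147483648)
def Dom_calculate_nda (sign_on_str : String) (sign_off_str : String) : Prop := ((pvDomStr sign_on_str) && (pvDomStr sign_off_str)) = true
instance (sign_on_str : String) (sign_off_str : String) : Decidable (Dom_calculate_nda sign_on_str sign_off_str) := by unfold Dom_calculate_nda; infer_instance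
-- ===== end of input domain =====

-- B replaces A's scan over the list of category records by two independent per-field
-- classifiers combined with max and a value→name table (objective: simpler decomposition).

-- shared helper (textually identical in Source A and Source B): to_minutes
def to_minutes (time_str : String) : Int :=
  if time_str = "" then -1
  else
    match PySem.Str.split? time_str ":" with
    | some [hs, ms] =>
      match PySem.Int.ofStr? hs, PySem.Int.ofStr? ms with
      | some h, some m => h * 60 + m
      | _, _ => -1          -- int() raised ValueError
    | _ => -1               -- unpacking to (h, m) raised ValueError

-- ===== PORT A =====
def ndaStep (off_m on_m : Int) (st : Option String × Int)
    (cat : String × Int × (Int × Int) × (Int × Int)) : Option String × Int :=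
  match cat with
  | (name, value, offr, onr) =>
    let off_match : Bool := decide (offr.1 ≤ off_m ∧ off_m ≤ offr.2)
    let off_match : Bool := if name = "N3" ∧ off_m = 1440 then true else off_match
    let on_match : Bool := decide (onr.1 ≤ on_m ∧ on_m ≤ onr.2)
    if off_match || on_match then
      if value > st.2 then (some name, value) else st
    else st

def calculate_nda (sign_on_str : String) (sign_off_str : String) : Option String × Int :=
  let on_m := to_minutes sign_on_str
  let off_m := to_minutes sign_off_str
  if on_m = -1 ∨ off_m = -1 then (none, 0)
  else
    let off_m := if off_m = 0 ∧ on_m > 720 then 1440 else off_m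
    let categories : List (String × Int × (Int × Int) × (Int × Int)) :=
      [("N4", 175, (60, 360), (60, 120)),
       ("N3", 140, (0, 59), (121, 180)),
       ("N2", 120, (1380, 1439), (181, 240)),
       ("N1", 90, (1320, 1379), (241, 300))]
    categories.foldl (ndaStep off_m on_m) (none, 0)

-- ===== PORT B =====
def classify_off (off_m : Int) : Int :=
  if 60 ≤ off_m ∧ off_m ≤ 360 then 175
  else if (0 ≤ off_m ∧ off_m ≤ 59) ∨ off_m = 1440 then 140
  else if 1380 ≤ off_m ∧ off_m ≤ 1439 then 120
  else if 1320 ≤ off_m ∧ off_m ≤ 1379 then 90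
  else 0

def classify_on (on_m : Int) : Int :=
  if 60 ≤ on_m ∧ on_m ≤ 120 then 175
  else if 121 ≤ on_m ∧ on_m ≤ 180 then 140
  else if 181 ≤ on_m ∧ on_m ≤ 240 then 120
  else if 241 ≤ on_m ∧ on_m ≤ 300 then 90
  else 0

def nameOfValue : PySem.Dict Int String :=
  PySem.Dict.ofList [((175 : Int), "N4"), (140, "N3"), (120, "N2"), (90, "N1")]

def calculate_nda_alt (sign_on_str : String) (sign_off_str : String) : Option String × Int :=
  let on_m := to_minutes sign_on_str
  let off_m := to_minutes sign_off_str
  if on_m = -1 ∨ off_m = -1 then (none, 0)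
  else
    let off_m := if off_m = 0 ∧ on_m > 720 then 1440 else off_m
    let best := max (classify_off off_m) (classify_on on_m)
    if best = 0 then (none, 0)
    else (PySem.Dict.get? nameOfValue best, best)   -- _NAME_OF_VALUE[best]; the key is always present

-- ===== PRECONDITION & SPEC =====
def Spec_calculate_nda (sign_on_str : String) (sign_off_str : String) (out : Option String × Int) : Prop := out = calculate_nda_alt sign_on_str sign_off_str
instance (sign_on_str : String) (sign_off_str : String) (out : Option String × Int) : Decidable (Spec_calculate_nda sign_on_str sign_off_str out) := by unfold Spec_calculate_nda; infer_instance

-- ===== CLAIM (what is proved, stated in full; the proofs are below) =====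
def Claim_equal_calculate_nda : Prop := ∀ (sign_on_str : String) (sign_off_str : String), Dom_calculate_nda sign_on_str sign_off_str → Spec_calculate_nda sign_on_str sign_off_str (calculate_nda sign_on_str sign_off_str)

-- ===== LEMMAS AND PROOFS =====
lemma step_eq (off on : Int) (st : Option String × Int) (name : String) (value olo ohi nlo nhi : Int) :
    ndaStep off on st (name, value, (olo, ohi), (nlo, nhi)) =
      if ((name = "N3" ∧ off = 1440) ∨ (olo ≤ off ∧ off ≤ ohi)) ∨ (nlo ≤ on ∧ on ≤ nhi) then
        (if value > st.2 then (some name, value) else st)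
      else st := by
  unfold ndaStep
  by_cases hB : name = "N3" ∧ off = 1440 <;>
    by_cases hA : olo ≤ off ∧ off ≤ ohi <;>
      by_cases hC : nlo ≤ on ∧ on ≤ nhi <;>
        simp [hA, hB, hC]

lemma step4 (off on : Int) (st : Option String × Int) :
    ndaStep off on st ("N4", 175, (60, 360), (60, 120)) =
      if (60 ≤ off ∧ off ≤ 360) ∨ (60 ≤ on ∧ on ≤ 120) then (if 175 > st.2 then (some "N4", 175) else st) else st := by
  rw [step_eq]; by_cases h : off = 1440 <;> simp [h]

lemma step3 (off on : Int) (st : Option String × Int) :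
    ndaStep off on st ("N3", 140, (0, 59), (121, 180)) =
      if ((off = 1440 ∨ (0 ≤ off ∧ off ≤ 59))) ∨ (121 ≤ on ∧ on ≤ 180) then (if 140 > st.2 then (some "N3", 140) else st) else st := by
  rw [step_eq]; by_cases h : off = 1440 <;> simp [h]

lemma step2 (off on : Int) (st : Option String × Int) :
    ndaStep off on st ("N2", 120, (1380, 1439), (181, 240)) =
      if (1380 ≤ off ∧ off ≤ 1439) ∨ (181 ≤ on ∧ on ≤ 240) then (if 120 > st.2 then (some "N2", 120) else st) else st := by
  rw [step_eq]; by_cases h : off = 1440 <;> simp [h]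

lemma step1 (off on : Int) (st : Option String × Int) :
    ndaStep off on st ("N1", 90, (1320, 1379), (241, 300)) =
      if (1320 ≤ off ∧ off ≤ 1379) ∨ (241 ≤ on ∧ on ≤ 300) then (if 90 > st.2 then (some "N1", 90) else st) else st := by
  rw [step_eq]; by_cases h : off = 1440 <;> simp [h]

lemma coff0 (off : Int)  (_h0 : 60 ≤ off ∧ off ≤ 360) : classify_off off = 175 := by
  unfold classify_off; split_ifs <;> omega

lemma coff1 (off : Int) (_h0 : ¬(60 ≤ off ∧ off ≤ 360)) (_h1 : off = 1440 ∨ (0 ≤ off ∧ off ≤ 59)) : classify_off off = 140 := by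
  unfold classify_off; split_ifs <;> omega

lemma coff2 (off : Int) (_h0 : ¬(60 ≤ off ∧ off ≤ 360)) (_h1 : ¬(off = 1440 ∨ (0 ≤ off ∧ off ≤ 59))) (_h2 : 1380 ≤ off ∧ off ≤ 1439) : classify_off off = 120 := by
  unfold classify_off; split_ifs <;> omega

lemma coff3 (off : Int) (_h0 : ¬(60 ≤ off ∧ off ≤ 360)) (_h1 : ¬(off = 1440 ∨ (0 ≤ off ∧ off ≤ 59))) (_h2 : ¬(1380 ≤ off ∧ off ≤ 1439)) (_h3 : 1320 ≤ off ∧ off ≤ 1379) : classify_off off = 90 := by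
  unfold classify_off; split_ifs <;> omega

lemma coff4 (off : Int) (_h0 : ¬(60 ≤ off ∧ off ≤ 360)) (_h1 : ¬(off = 1440 ∨ (0 ≤ off ∧ off ≤ 59))) (_h2 : ¬(1380 ≤ off ∧ off ≤ 1439)) (_h3 : ¬(1320 ≤ off ∧ off ≤ 1379)) : classify_off off = 0 := by
  unfold classify_off; split_ifs <;> omega

lemma con0 (on : Int)  (_h0 : 60 ≤ on ∧ on ≤ 120) : classify_on on = 175 := by
  unfold classify_on; split_ifs <;> omega

lemma con1 (on : Int) (_h0 : ¬(60 ≤ on ∧ on ≤ 120)) (_h1 : 121 ≤ on ∧ on ≤ 180) : classify_on on = 140 := by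
  unfold classify_on; split_ifs <;> omega

lemma con2 (on : Int) (_h0 : ¬(60 ≤ on ∧ on ≤ 120)) (_h1 : ¬(121 ≤ on ∧ on ≤ 180)) (_h2 : 181 ≤ on ∧ on ≤ 240) : classify_on on = 120 := by
  unfold classify_on; split_ifs <;> omega

lemma con3 (on : Int) (_h0 : ¬(60 ≤ on ∧ on ≤ 120)) (_h1 : ¬(121 ≤ on ∧ on ≤ 180)) (_h2 : ¬(181 ≤ on ∧ on ≤ 240)) (_h3 : 241 ≤ on ∧ on ≤ 300) : classify_on on = 90 := by
  unfold classify_on; split_ifs <;> omega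

lemma con4 (on : Int) (_h0 : ¬(60 ≤ on ∧ on ≤ 120)) (_h1 : ¬(121 ≤ on ∧ on ≤ 180)) (_h2 : ¬(181 ≤ on ∧ on ≤ 240)) (_h3 : ¬(241 ≤ on ∧ on ≤ 300)) : classify_on on = 0 := by
  unfold classify_on; split_ifs <;> omega

lemma g175 : PySem.Dict.get? nameOfValue 175 = some "N4" := by decide
lemma g140 : PySem.Dict.get? nameOfValue 140 = some "N3" := by decide
lemma g120 : PySem.Dict.get? nameOfValue 120 = some "N2" := by decide
lemma g90 : PySem.Dict.get? nameOfValue 90 = some "N1" := by decide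

set_option maxHeartbeats 4000000 in
lemma core_eq (off on : Int) :
    ([("N4", 175, (60, 360), (60, 120)),
      ("N3", 140, (0, 59), (121, 180)),
      ("N2", 120, (1380, 1439), (181, 240)),
      ("N1", 90, (1320, 1379), (241, 300))] : List (String × Int × (Int × Int) × (Int × Int))).foldl
        (ndaStep off on) (none, 0)
      = (if max (classify_off off) (classify_on on) = 0 then (none, 0)
         else (PySem.Dict.get? nameOfValue (max (classify_off off) (classify_on on)),
               max (classify_off off) (classify_on on))) := by
  by_cases o0 : 60 ≤ off ∧ off ≤ 360
  case pos =>
    by_cases n0 : 60 ≤ on ∧ on ≤ 120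
    case pos =>
      have hoff := coff0 off  o0
      have hon := con0 on  n0
      simp only [List.foldl, step4, step3, step2, step1]
      simp [o0, n0, hoff, hon, g175]
    case neg =>
      by_cases n1 : 121 ≤ on ∧ on ≤ 180
      case pos =>
        have hoff := coff0 off  o0
        have hon := con1 on n0 n1
        simp only [List.foldl, step4, step3, step2, step1]
        simp [o0, n0, n1, hoff, hon, g175]
      case neg =>
        by_cases n2 : 181 ≤ on ∧ on ≤ 240
        case pos =>
          have hoff := coff0 off  o0
          have hon := con2 on n0 n1 n2
          simp only [List.foldl, step4, step3, step2, step1]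
          simp [o0, n0, n1, n2, hoff, hon, g175]
        case neg =>
          by_cases n3 : 241 ≤ on ∧ on ≤ 300
          case pos =>
            have hoff := coff0 off  o0
            have hon := con3 on n0 n1 n2 n3
            simp only [List.foldl, step4, step3, step2, step1]
            simp [o0, n0, n1, n2, n3, hoff, hon, g175]
          case neg =>
            have hoff := coff0 off  o0
            have hon := con4 on n0 n1 n2 n3
            simp only [List.foldl, step4, step3, step2, step1]
            simp [o0, n0, n1, n2, n3, hoff, hon, g175]
  case neg =>
    by_cases o1 : off = 1440 ∨ (0 ≤ off ∧ off ≤ 59)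
    case pos =>
      by_cases n0 : 60 ≤ on ∧ on ≤ 120
      case pos =>
        have hoff := coff1 off o0 o1
        have hon := con0 on  n0
        simp only [List.foldl, step4, step3, step2, step1]
        simp [o0, o1, n0, hoff, hon, g175]
      case neg =>
        by_cases n1 : 121 ≤ on ∧ on ≤ 180
        case pos =>
          have hoff := coff1 off o0 o1
          have hon := con1 on n0 n1
          simp only [List.foldl, step4, step3, step2, step1]
          simp [o0, o1, n0, n1, hoff, hon, g140]
        case neg =>
          by_cases n2 : 181 ≤ on ∧ on ≤ 240
          case pos =>
            have hoff := coff1 off o0 o1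
            have hon := con2 on n0 n1 n2
            simp only [List.foldl, step4, step3, step2, step1]
            simp [o0, o1, n0, n1, n2, hoff, hon, g140]
          case neg =>
            by_cases n3 : 241 ≤ on ∧ on ≤ 300
            case pos =>
              have hoff := coff1 off o0 o1
              have hon := con3 on n0 n1 n2 n3
              simp only [List.foldl, step4, step3, step2, step1]
              simp [o0, o1, n0, n1, n2, n3, hoff, hon, g140]
            case neg =>
              have hoff := coff1 off o0 o1
              have hon := con4 on n0 n1 n2 n3
              simp only [List.foldl, step4, step3, step2, step1]
              simp [o0, o1, n0, n1, n2, n3, hoff, hon, g140]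
    case neg =>
      by_cases o2 : 1380 ≤ off ∧ off ≤ 1439
      case pos =>
        by_cases n0 : 60 ≤ on ∧ on ≤ 120
        case pos =>
          have hoff := coff2 off o0 o1 o2
          have hon := con0 on  n0
          simp only [List.foldl, step4, step3, step2, step1]
          simp [o0, o1, o2, n0, hoff, hon, g175]
        case neg =>
          by_cases n1 : 121 ≤ on ∧ on ≤ 180
          case pos =>
            have hoff := coff2 off o0 o1 o2
            have hon := con1 on n0 n1
            simp only [List.foldl, step4, step3, step2, step1]
            simp [o0, o1, o2, n0, n1, hoff, hon, g140]
          case neg =>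
            by_cases n2 : 181 ≤ on ∧ on ≤ 240
            case pos =>
              have hoff := coff2 off o0 o1 o2
              have hon := con2 on n0 n1 n2
              simp only [List.foldl, step4, step3, step2, step1]
              simp [o0, o1, o2, n0, n1, n2, hoff, hon, g120]
            case neg =>
              by_cases n3 : 241 ≤ on ∧ on ≤ 300
              case pos =>
                have hoff := coff2 off o0 o1 o2
                have hon := con3 on n0 n1 n2 n3
                simp only [List.foldl, step4, step3, step2, step1]
                simp [o0, o1, o2, n0, n1, n2, n3, hoff, hon, g120]
              case neg =>
                have hoff := coff2 off o0 o1 o2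
                have hon := con4 on n0 n1 n2 n3
                simp only [List.foldl, step4, step3, step2, step1]
                simp [o0, o1, o2, n0, n1, n2, n3, hoff, hon, g120]
      case neg =>
        by_cases o3 : 1320 ≤ off ∧ off ≤ 1379
        case pos =>
          by_cases n0 : 60 ≤ on ∧ on ≤ 120
          case pos =>
            have hoff := coff3 off o0 o1 o2 o3
            have hon := con0 on  n0
            simp only [List.foldl, step4, step3, step2, step1]
            simp [o0, o1, o2, o3, n0, hoff, hon, g175]
          case neg =>
            by_cases n1 : 121 ≤ on ∧ on ≤ 180
            case pos =>
              have hoff := coff3 off o0 o1 o2 o3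
              have hon := con1 on n0 n1
              simp only [List.foldl, step4, step3, step2, step1]
              simp [o0, o1, o2, o3, n0, n1, hoff, hon, g140]
            case neg =>
              by_cases n2 : 181 ≤ on ∧ on ≤ 240
              case pos =>
                have hoff := coff3 off o0 o1 o2 o3
                have hon := con2 on n0 n1 n2
                simp only [List.foldl, step4, step3, step2, step1]
                simp [o0, o1, o2, o3, n0, n1, n2, hoff, hon, g120]
              case neg =>
                by_cases n3 : 241 ≤ on ∧ on ≤ 300
                case pos =>
                  have hoff := coff3 off o0 o1 o2 o3
                  have hon := con3 on n0 n1 n2 n3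
                  simp only [List.foldl, step4, step3, step2, step1]
                  simp [o0, o1, o2, o3, n0, n1, n2, n3, hoff, hon, g90]
                case neg =>
                  have hoff := coff3 off o0 o1 o2 o3
                  have hon := con4 on n0 n1 n2 n3
                  simp only [List.foldl, step4, step3, step2, step1]
                  simp [o0, o1, o2, o3, n0, n1, n2, n3, hoff, hon, g90]
        case neg =>
          by_cases n0 : 60 ≤ on ∧ on ≤ 120
          case pos =>
            have hoff := coff4 off o0 o1 o2 o3
            have hon := con0 on  n0
            simp only [List.foldl, step4, step3, step2, step1]
            simp [o0, o1, o2, o3, n0, hoff, hon, g175]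
          case neg =>
            by_cases n1 : 121 ≤ on ∧ on ≤ 180
            case pos =>
              have hoff := coff4 off o0 o1 o2 o3
              have hon := con1 on n0 n1
              simp only [List.foldl, step4, step3, step2, step1]
              simp [o0, o1, o2, o3, n0, n1, hoff, hon, g140]
            case neg =>
              by_cases n2 : 181 ≤ on ∧ on ≤ 240
              case pos =>
                have hoff := coff4 off o0 o1 o2 o3
                have hon := con2 on n0 n1 n2
                simp only [List.foldl, step4, step3, step2, step1]
                simp [o0, o1, o2, o3, n0, n1, n2, hoff, hon, g120]
              case neg =>
                by_cases n3 : 241 ≤ on ∧ on ≤ 300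
                case pos =>
                  have hoff := coff4 off o0 o1 o2 o3
                  have hon := con3 on n0 n1 n2 n3
                  simp only [List.foldl, step4, step3, step2, step1]
                  simp [o0, o1, o2, o3, n0, n1, n2, n3, hoff, hon, g90]
                case neg =>
                  have hoff := coff4 off o0 o1 o2 o3
                  have hon := con4 on n0 n1 n2 n3
                  simp only [List.foldl, step4, step3, step2, step1]
                  simp [o0, o1, o2, o3, n0, n1, n2, n3, hoff, hon]

-- ===== VERDICT (by name: the statement is the Claim_ definition above) =====
theorem calculate_nda_spec : Claim_equal_calculate_nda := by
  intro son soff _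
  unfold Spec_calculate_nda calculate_nda calculate_nda_alt
  by_cases h : to_minutes son = -1 ∨ to_minutes soff = -1
  · simp [h]
  · simp only [h, ite_false]
    exact core_eq _ _
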